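-- pv_equiv track=rewrite | github.com/NaNdalal-dev/codeWars | FreqSeq.py | freq_seq
-- ===== SOURCE A (Python) =====
-- def freq_seq(s, sep):
--     d = dict()
--     #Counting Frequeny of each character
--     for val in s:
--     	if val in d:
--     		d[val] += 1
--     	else:
--     		d[val] = 1
--
--
--     new_s = ''
--     for val in s:
--     	new_s += str(d[val])
--     return f'{sep}'.join(new_s)
-- ===== SOURCE B (Python) =====
-- def freq_seq(s, sep):
--     # Sort the characters and run-length-encode the sorted sequence to obtain
--     # each character's frequency (no hash counting), then emit each count's
--     # digits, sep-joined.
--     counts = {}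
--     prev = None
--     run = 0
--     for c in sorted(s):
--         if c == prev:
--             run += 1
--         else:
--             if run:
--                 counts[prev] = run
--             prev = c
--             run = 1
--     if run:
--         counts[prev] = run
--     return sep.join(d for c in s for d in str(counts[c]))
-- ===== Notes on version B (the rewrite author's own statement) =====
-- stated objective: alternative
-- what changed: Replaces A's hash-increment frequency dict with a sort-then-run-length-encode pass (frequencies read off as run lengths of the sorted characters) and replaces A's string-concatenation loop with a flattened generator feeding the count digits straight to sep.join.
import Mathlib
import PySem

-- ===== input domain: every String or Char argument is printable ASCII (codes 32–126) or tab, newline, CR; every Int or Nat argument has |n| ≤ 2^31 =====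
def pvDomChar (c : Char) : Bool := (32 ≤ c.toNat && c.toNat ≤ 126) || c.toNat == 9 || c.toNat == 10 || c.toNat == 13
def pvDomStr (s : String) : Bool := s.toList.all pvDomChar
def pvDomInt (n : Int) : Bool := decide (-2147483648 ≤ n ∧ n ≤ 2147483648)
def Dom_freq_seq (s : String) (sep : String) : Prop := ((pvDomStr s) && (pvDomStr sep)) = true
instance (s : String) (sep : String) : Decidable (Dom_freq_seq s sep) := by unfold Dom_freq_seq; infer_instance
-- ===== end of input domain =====

-- B replaces A's hash-increment frequency dict with a sort-then-run-length-encode pass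
-- (frequencies read off as run lengths of the sorted characters) and A's concatenation
-- loop with a flattened comprehension; objective: alternative (not faster).


-- ===== PORT A =====
-- d[val] += 1 on a present key is Dict.modify; d[val] = 1 on an absent key is Dict.insert.
-- d[val] in the second loop is ported as getD val 0: val ∈ s, so the key is always present
-- and Python's lookup never raises. new_s is built over List Char (Lean's String.append is
-- kernel-opaque); f'{sep}'.join(new_s) joins the characters of new_s, each as a 1-char string.
def freq_seq (s : String) (sep : String) : String :=
  let d : PySem.Dict Char Int :=
    s.toList.foldl
      (fun d val => if d.contains val then d.modify val 0 (· + 1) else d.insert val 1)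
      PySem.Dict.empty
  let new_s : List Char :=
    s.toList.foldl (fun acc val => acc ++ PySem.Int.toChars (d.getD val 0)) []
  PySem.Str.join sep (new_s.map (fun c => String.mk [c]))

-- ===== PORT B =====
-- Loop body of 'for c in sorted(s)': state is (counts, prev, run); prev starts as None
-- (Option Char), and 'c == prev' with prev = None is False, as in Python.
def fsAltStep (st : PySem.Dict Char Int × Option Char × Int) (c : Char) :
    PySem.Dict Char Int × Option Char × Int :=
  if some c = st.2.1 then (st.1, st.2.1, st.2.2 + 1)
  else
    ((if st.2.2 ≠ 0 then
        match st.2.1 with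
        | some p => st.1.insert p st.2.2
        | none => st.1   -- unreachable: run ≠ 0 only after prev was set
      else st.1), some c, 1)

-- trailing 'if run: counts[prev] = run'
def fsAltWrap (st : PySem.Dict Char Int × Option Char × Int) : PySem.Dict Char Int :=
  if st.2.2 ≠ 0 then
    match st.2.1 with
    | some p => st.1.insert p st.2.2
    | none => st.1
  else st.1

-- counts[c] in the final comprehension is ported as getD c 0: c ∈ s, so the key is present
-- (every character of s occurs in sorted(s)) and Python's lookup never raises.
def freq_seq_alt (s : String) (sep : String) : String :=
  let counts : PySem.Dict Char Int :=
    fsAltWrap ((PySem.List.sorted s.toList (fun x => x) false).foldl fsAltStep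
      (PySem.Dict.empty, none, 0))
  PySem.Str.join sep
    ((s.toList.flatMap (fun c => PySem.Int.toChars (counts.getD c 0))).map
      (fun d => String.mk [d]))

-- ===== PRECONDITION & SPEC =====
def Spec_freq_seq (s : String) (sep : String) (out : String) : Prop := out = freq_seq_alt s sep
instance (s : String) (sep : String) (out : String) : Decidable (Spec_freq_seq s sep out) := by unfold Spec_freq_seq; infer_instance

-- ===== CLAIM (what is proved, stated in full; the proofs are below) =====
def Claim_equal_freq_seq : Prop := ∀ (s : String) (sep : String), Dom_freq_seq s sep → Spec_freq_seq s sep (freq_seq s sep)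

-- ===== LEMMAS AND PROOFS =====

-- A's branchy counter loop computes the running count, for every key.
theorem getD_freq_fold (l : List Char) (d : PySem.Dict Char Int) (v : Char) :
    (l.foldl (fun d val => if d.contains val then d.modify val 0 (· + 1) else d.insert val 1) d).getD v 0
      = d.getD v 0 + l.count v := by
  induction l generalizing d with
  | nil => simp
  | cons x t ih =>
    simp only [List.foldl_cons, ih]
    have hstep : (if d.contains x then d.modify x 0 (· + 1) else d.insert x 1).getD v 0
        = d.getD v 0 + if x = v then 1 else 0 := by
      by_cases hc : d.contains x
      · simp only [hc, if_true]
        by_cases hv : v = x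
        · subst hv; simp [PySem.Dict.getD_modify_self]
        · simp [PySem.Dict.getD_modify_of_ne d 0 _ hv, Ne.symm hv]
      · simp only [Bool.not_eq_true] at hc
        simp only [hc, Bool.false_eq_true, if_false]
        by_cases hv : v = x
        · subst hv
          simp [PySem.Dict.getD_of_not_contains d 0 hc]
        · simp [PySem.Dict.getD_insert_of_ne d 1 0 hv, Ne.symm hv]
    rw [hstep, List.count_cons]
    by_cases hv : x = v <;> simp [hv] <;> ring

-- Run-length invariant of B's loop over the (sorted) remainder r: with current run
-- (p, run), the final wrapped dict maps c to its count in r plus the pending run.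
theorem wrap_fold_rle (r : List Char) (counts : PySem.Dict Char Int) (p : Char) (run : Int)
    (hr : r.Pairwise (· ≤ ·)) (hp : ∀ x ∈ r, p ≤ x) (hrun : 0 < run)
    (h0 : ∀ y, p < y → counts.getD y 0 = 0) (c : Char) :
    (fsAltWrap (r.foldl fsAltStep (counts, some p, run))).getD c 0
      = (if c = p then run else counts.getD c 0) + (r.count c : Int) := by
  induction r generalizing counts p run with
  | nil =>
    simp only [List.foldl_nil, fsAltWrap]
    have : run ≠ 0 := by omega
    simp [this, PySem.Dict.getD_insert]
  | cons x r' ih =>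
    have hpx : p ≤ x := hp x (List.mem_cons_self ..)
    simp only [List.foldl_cons]
    by_cases hx : x = p
    · subst hx
      have hstep : fsAltStep (counts, some x, run) x = (counts, some x, run + 1) := by
        simp [fsAltStep]
      rw [hstep, ih counts x (run + 1) hr.of_cons
        (fun y hy => hp y (List.mem_cons_of_mem _ hy)) (by omega) h0]
      rw [List.count_cons]
      by_cases hc : c = x
      · subst hc; simp; try push_cast; try omega
      · simp [hc, Ne.symm hc]; try push_cast; try omega
    · have hlt : p < x := lt_of_le_of_ne hpx (Ne.symm hx)
      have hstep : fsAltStep (counts, some p, run) x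
          = (counts.insert p run, some x, 1) := by
        have h1 : ¬ (some x = some p) := by simp [hx]
        have h2 : run ≠ 0 := by omega
        simp [fsAltStep, h1, h2]
      rw [hstep]
      have hp' : ∀ y ∈ r', x ≤ y := fun y hy => (List.pairwise_cons.mp hr).1 y hy
      have h0' : ∀ y, x < y → (counts.insert p run).getD y 0 = 0 := by
        intro y hy
        have hyp : y ≠ p := by
          intro h; subst h; exact absurd (lt_trans hlt hy) (lt_irrefl _)
        rw [PySem.Dict.getD_insert_of_ne _ _ _ hyp]
        exact h0 y (lt_trans hlt hy)
      rw [ih (counts.insert p run) x 1 hr.of_cons hp' (by omega) h0']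
      rw [List.count_cons]
      by_cases hc : c = x
      · subst hc
        have : counts.getD c 0 = 0 := h0 c hlt
        simp [hx, this]
        push_cast; ring
      · rw [PySem.Dict.getD_insert]
        by_cases hcp : c = p
        · subst hcp; simp [hc, hx, Ne.symm hc]; try push_cast; try omega
        · simp [hc, hcp, Ne.symm hc]; try push_cast; try omega

-- B's resulting dict gives every character its count in s.
theorem alt_counts (s : String) (c : Char) :
    (fsAltWrap ((PySem.List.sorted s.toList (fun x => x) false).foldl fsAltStep
        (PySem.Dict.empty, none, 0))).getD c 0
      = (s.toList.count c : Int) := by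
  have hperm : (PySem.List.sorted s.toList (fun x => x) false).Perm s.toList :=
    PySem.List.sorted_perm ..
  have hcnt : (PySem.List.sorted s.toList (fun x => x) false).count c = s.toList.count c :=
    hperm.count_eq c
  have hpw : (PySem.List.sorted s.toList (fun x => x) false).Pairwise (· ≤ ·) := by
    have := PySem.List.sorted_pairwise s.toList (fun x => x) (κ := Char)
    simpa using this
  rcases hs : PySem.List.sorted s.toList (fun x => x) false with _ | ⟨x, r⟩
  · rw [hs] at hcnt
    simp only [List.foldl_nil, fsAltWrap]
    simp [← hcnt]
  · rw [hs] at hcnt hpw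
    have hstep : fsAltStep (PySem.Dict.empty, none, 0) x
        = (PySem.Dict.empty, some x, 1) := by
      simp [fsAltStep]
    simp only [List.foldl_cons, hstep]
    rw [wrap_fold_rle r PySem.Dict.empty x 1 hpw.of_cons
      (fun y hy => (List.pairwise_cons.mp hpw).1 y hy) (by omega)
      (fun y _ => PySem.Dict.getD_empty ..) c]
    rw [← hcnt, List.count_cons]
    by_cases hc : c = x
    · subst hc; simp; push_cast; omega
    · simp [hc, Ne.symm hc]

-- ===== VERDICT (by name: the statement is the Claim_ definition above) =====
theorem freq_seq_spec : Claim_equal_freq_seq := by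
  intro s sep _
  unfold Spec_freq_seq
  simp only [freq_seq, freq_seq_alt]
  congr 1
  congr 1
  rw [PySem.List.foldl_append_eq_flatMap]
  simp only [List.nil_append]
  apply List.flatMap_congr
  intro c _
  rw [getD_freq_fold, alt_counts]
  simp [PySem.Dict.getD_empty]
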